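-- pv_equiv track=rewrite | github.com/thepianista/Landing-Page-Alpino-AI | hierarchical_xml_to_excel_by_id_JSON.py | build_id_to_path
-- ===== SOURCE A (Python) =====
-- from typing import Dict, List
--
-- def build_id_to_path(id_to_tag: Dict[str, str]) -> Dict[str, List[str]]:
--     """Construct a mapping from ID code to the list of tag names along the path."""
--     id_to_path: Dict[str, List[str]] = {}
--     for id_code, tag in id_to_tag.items():
--         parts = id_code.split('.')
--         path: List[str] = []
--         for i in range(1, len(parts) + 1):
--             prefix = '.'.join(parts[:i])
--             t = id_to_tag.get(prefix)
--             if t: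
--                 path.append(t)
--         id_to_path[id_code] = path
--     return id_to_path
-- ===== SOURCE B (Python) =====
-- def build_id_to_path(id_to_tag):
--     """Construct a mapping from ID code to the list of tag names along the path.
--
--     Memoizes the path per prefix: path(prefix) = path(parent prefix) + [tag if present],
--     so shared prefixes are computed once across all ids.
--     """
--     memo = {}
--
--     def path_of(parts):
--         cached = memo.get(parts)
--         if cached is not None:
--             return cached
--         if not parts:
--             return []
--         t = id_to_tag.get('.'.join(parts))
--         res = path_of(parts[:-1]) + ([t] if t else [])
--         memo[parts] = res
--         return res
--
--     return {k: path_of(tuple(k.split('.'))) for k in id_to_tag}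
-- ===== Notes on version B (the rewrite author's own statement) =====
-- stated objective: alternative
-- what changed: Replaces A's per-id rebuild of every prefix path (re-joining and re-looking-up each '.'-prefix from scratch for every id) by a recursion path(prefix) = path(parent prefix) + [tag if present] memoized per prefix tuple, so paths shared between ids are computed once.
import Mathlib
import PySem

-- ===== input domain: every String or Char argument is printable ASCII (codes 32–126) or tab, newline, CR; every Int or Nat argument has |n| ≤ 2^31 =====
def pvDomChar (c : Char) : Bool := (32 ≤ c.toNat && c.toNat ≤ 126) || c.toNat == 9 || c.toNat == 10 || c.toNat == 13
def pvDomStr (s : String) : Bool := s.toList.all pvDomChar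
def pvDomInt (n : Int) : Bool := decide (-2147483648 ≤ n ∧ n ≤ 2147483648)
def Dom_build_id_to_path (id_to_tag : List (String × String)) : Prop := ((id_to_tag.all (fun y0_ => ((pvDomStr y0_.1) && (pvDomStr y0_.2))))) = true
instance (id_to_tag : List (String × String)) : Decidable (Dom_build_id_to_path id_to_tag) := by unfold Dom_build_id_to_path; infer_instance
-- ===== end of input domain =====

-- B memoizes the tag path per dotted prefix (path(prefix) = path(parent) + [tag if present])
-- instead of re-joining and re-looking-up every prefix from scratch for every id; objective: alternative.


-- ===== PORT A =====
-- the dict argument arrives as an association list; Python's dict(pairs) is PySem.Dict.ofList (last value wins, first position)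
def build_id_to_path (id_to_tag : List (String × String)) : List (String × List String) :=
  let d := PySem.Dict.ofList id_to_tag
  (d.items.foldl (fun (acc : PySem.Dict String (List String)) p =>
      let parts := (PySem.Str.split? p.1 ".").getD []   -- sep "." ≠ "", so split? is always some
      let path := (PySem.List.pyRange 1 ((parts.length : Int) + 1) 1).foldl
        (fun (path : List String) i =>
          let pre := PySem.Str.join "." (PySem.List.slice parts none (some i))
          match d.get? pre with
          | some t => if t ≠ "" then path ++ [t] else path   -- 'if t:' — truthy string
          | none => path) []
      acc.insert p.1 path) PySem.Dict.empty).items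

-- ===== PORT B =====
-- path_of with its memo threaded through (Python closes over the mutable memo dict)
def pvPathOf (d : PySem.Dict String String)
    (memo : PySem.Dict (List String) (List String)) (parts : List String) :
    List String × PySem.Dict (List String) (List String) :=
  match memo.get? parts with
  | some cached => (cached, memo)
  | none =>
    if h : parts = [] then ([], memo)
    else
      let r := pvPathOf d memo parts.dropLast
      let t := d.getD (PySem.Str.join "." parts) ""   -- .get(…) then 'if t' — None/'' both falsy
      let res := if t ≠ "" then r.1 ++ [t] else r.1
      (res, r.2.insert parts res)
termination_by parts.length
decreasing_by
  have : parts.length ≠ 0 := fun hz => h (List.eq_nil_of_length_eq_zero hz)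
  simp [List.length_dropLast]; omega

def build_id_to_path_alt (id_to_tag : List (String × String)) : List (String × List String) :=
  let d := PySem.Dict.ofList id_to_tag
  (d.keys.foldl (fun (st : PySem.Dict String (List String) × PySem.Dict (List String) (List String)) k =>
      let pr := pvPathOf d st.2 ((PySem.Str.split? k ".").getD [])
      (st.1.insert k pr.1, pr.2)) (PySem.Dict.empty, PySem.Dict.empty)).1.items

-- ===== PRECONDITION & SPEC =====
def Spec_build_id_to_path (id_to_tag : List (String × String)) (out : List (String × List String)) : Prop := out = build_id_to_path_alt id_to_tag
instance (id_to_tag : List (String × String)) (out : List (String × List String)) : Decidable (Spec_build_id_to_path id_to_tag out) := by unfold Spec_build_id_to_path; infer_instance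

-- ===== CLAIM (what is proved, stated in full; the proofs are below) =====
def Claim_equal_build_id_to_path : Prop := ∀ (id_to_tag : List (String × String)), Dom_build_id_to_path id_to_tag → Spec_build_id_to_path id_to_tag (build_id_to_path id_to_tag)

-- ===== LEMMAS AND PROOFS =====

-- the memo-free meaning of a path: path(parts) = path(parts minus last) + [tag of the full join, if truthy]
def pvSpecPath (d : PySem.Dict String String) (parts : List String) : List String :=
  if h : parts = [] then []
  else
    pvSpecPath d parts.dropLast ++
      (let t := d.getD (PySem.Str.join "." parts) ""
       if t ≠ "" then [t] else [])
termination_by parts.length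
decreasing_by
  have : parts.length ≠ 0 := fun hz => h (List.eq_nil_of_length_eq_zero hz)
  simp [List.length_dropLast]; omega

-- equation lemmas
theorem pvSpecPath_nil (d : PySem.Dict String String) : pvSpecPath d [] = [] := by
  rw [pvSpecPath]; simp

theorem pvSpecPath_ne_nil (d : PySem.Dict String String) (parts : List String) (hp : parts ≠ []) :
    pvSpecPath d parts = pvSpecPath d parts.dropLast ++
      (if d.getD (PySem.Str.join "." parts) "" ≠ "" then [d.getD (PySem.Str.join "." parts) ""] else []) := by
  rw [pvSpecPath]
  simp [dif_neg hp]

theorem pvPathOf_correct (d : PySem.Dict String String) :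
    ∀ (n : ℕ) (parts : List String), parts.length ≤ n →
    ∀ (memo : PySem.Dict (List String) (List String)),
      (∀ qs v, memo.get? qs = some v → v = pvSpecPath d qs) →
      (pvPathOf d memo parts).1 = pvSpecPath d parts ∧
      (∀ qs v, (pvPathOf d memo parts).2.get? qs = some v → v = pvSpecPath d qs) := by
  intro n
  induction n with
  | zero =>
    intro parts hlen memo hinv
    have hp : parts = [] := List.eq_nil_of_length_eq_zero (Nat.le_zero.mp hlen)
    subst hp
    rw [pvPathOf]
    cases hget : memo.get? ([] : List String) with
    | some v => simp only []; exact ⟨hinv _ _ hget, hinv⟩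
    | none => simp only []; exact ⟨(pvSpecPath_nil d).symm, hinv⟩
  | succ m ih =>
    intro parts hlen memo hinv
    rw [pvPathOf]
    cases hget : memo.get? parts with
    | some v => simp only []; exact ⟨hinv _ _ hget, hinv⟩
    | none =>
      by_cases hp : parts = []
      · subst hp; simp only []; exact ⟨(pvSpecPath_nil d).symm, hinv⟩
      · simp only [dif_neg hp]
        have hlz : parts.length ≠ 0 := fun hz => hp (List.eq_nil_of_length_eq_zero hz)
        have hlen' : parts.dropLast.length ≤ m := by
          simp only [List.length_dropLast]; omega
        obtain ⟨h1, h2⟩ := ih parts.dropLast hlen' memo hinv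
        have hres : (if d.getD (PySem.Str.join "." parts) "" ≠ "" then
              (pvPathOf d memo parts.dropLast).1 ++ [d.getD (PySem.Str.join "." parts) ""]
            else (pvPathOf d memo parts.dropLast).1) = pvSpecPath d parts := by
          rw [h1, pvSpecPath_ne_nil d parts hp]
          split_ifs with hts <;> simp
        refine ⟨hres, ?_⟩
        intro qs v hq
        rw [PySem.Dict.get?_insert] at hq
        by_cases hqe : qs = parts
        · rw [if_pos hqe] at hq
          rw [hqe, ← Option.some.inj hq]
          exact hres
        · rw [if_neg hqe] at hq
          exact h2 _ _ hq

theorem pvAinner_correct (d : PySem.Dict String String) :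
    ∀ (n : ℕ) (parts : List String), parts.length ≤ n →
    ((PySem.List.pyRange 1 ((parts.length : Int) + 1) 1).foldl
        (fun (path : List String) i =>
          match d.get? (PySem.Str.join "." (PySem.List.slice parts none (some i))) with
          | some t => if t ≠ "" then path ++ [t] else path
          | none => path) []) = pvSpecPath d parts := by
  intro n
  induction n with
  | zero =>
    intro parts hlen
    have hp : parts = [] := List.eq_nil_of_length_eq_zero (Nat.le_zero.mp hlen)
    subst hp
    rw [PySem.List.pyRange_one_eq_nil (by norm_num)]
    simp [pvSpecPath_nil]
  | succ m ih =>
    intro parts hlen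
    by_cases hp : parts = []
    · subst hp
      rw [PySem.List.pyRange_one_eq_nil (by norm_num)]
      simp [pvSpecPath_nil]
    · have hlz : parts.length ≠ 0 := fun hz => hp (List.eq_nil_of_length_eq_zero hz)
      have hL : (1 : Int) ≤ (parts.length : Int) := by omega
      have hsplit : PySem.List.pyRange 1 ((parts.length : Int) + 1) 1
          = PySem.List.pyRange 1 (parts.length : Int) 1 ++ [(parts.length : Int)] :=
        PySem.List.pyRange_one_succ_right hL
      rw [hsplit, List.foldl_append]
      -- over i ∈ pyRange 1 L, the slice of parts equals the slice of parts.dropLast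
      have hcong : ∀ (acc : List String), ∀ i ∈ PySem.List.pyRange 1 (parts.length : Int) 1,
          (fun (path : List String) i =>
            match d.get? (PySem.Str.join "." (PySem.List.slice parts none (some i))) with
            | some t => if t ≠ "" then path ++ [t] else path
            | none => path) acc i
          = (fun (path : List String) i =>
            match d.get? (PySem.Str.join "." (PySem.List.slice parts.dropLast none (some i))) with
            | some t => if t ≠ "" then path ++ [t] else path
            | none => path) acc i := by
        intro acc i hi
        rw [PySem.List.mem_pyRange_one] at hi
        have h0i : (0 : Int) ≤ i := by omega
        have hslice : PySem.List.slice parts none (some i) = PySem.List.slice parts.dropLast none (some i) := by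
          rw [PySem.List.slice_to parts h0i, PySem.List.slice_to parts.dropLast h0i, List.dropLast_eq_take, List.take_take]
          have : i.toNat ≤ parts.length - 1 := by omega
          rw [Nat.min_eq_left this]
        simp only [hslice]
      rw [PySem.List.foldl_congr_mem _ _ _ _ hcong]
      have hdl : ((parts.dropLast.length : Int) + 1) = (parts.length : Int) := by
        simp only [List.length_dropLast]; omega
      have ihdl := ih parts.dropLast (by simp only [List.length_dropLast]; omega)
      rw [hdl] at ihdl
      rw [ihdl]
      -- final step at i = parts.length
      have hfull : PySem.List.slice parts none (some (parts.length : Int)) = parts := by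
        rw [PySem.List.slice_to parts (Int.natCast_nonneg _)]
        simp
      simp only [List.foldl_cons, List.foldl_nil, hfull]
      rw [pvSpecPath_ne_nil d parts hp]
      cases hget : d.get? (PySem.Str.join "." parts) with
      | some t =>
        have : d.getD (PySem.Str.join "." parts) "" = t := by
          rw [PySem.Dict.getD_eq_get?_getD, hget]; rfl
        rw [this]
        split_ifs with hts <;> simp [hts]
      | none =>
        have : d.getD (PySem.Str.join "." parts) "" = "" := by
          rw [PySem.Dict.getD_eq_get?_getD, hget]; rfl
        rw [this]
        simp

theorem pvFoldB (d : PySem.Dict String String) :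
    ∀ (ks : List String) (acc : PySem.Dict String (List String))
      (memo : PySem.Dict (List String) (List String)),
      (∀ qs v, memo.get? qs = some v → v = pvSpecPath d qs) →
      (List.foldl (fun (st : PySem.Dict String (List String) × PySem.Dict (List String) (List String)) k =>
          (st.1.insert k (pvPathOf d st.2 ((PySem.Str.split? k ".").getD [])).1,
           (pvPathOf d st.2 ((PySem.Str.split? k ".").getD [])).2)) (acc, memo) ks).1
      = List.foldl (fun a k => a.insert k (pvSpecPath d ((PySem.Str.split? k ".").getD []))) acc ks := by
  intro ks
  induction ks with
  | nil => intro acc memo _; rfl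
  | cons k ks ihk =>
    intro acc memo hinv
    simp only [List.foldl_cons]
    obtain ⟨h1, h2⟩ := pvPathOf_correct d ((PySem.Str.split? k ".").getD []).length _ le_rfl memo hinv
    rw [h1]
    exact ihk _ _ h2

-- ===== VERDICT (by name: the statement is the Claim_ definition above) =====
theorem build_id_to_path_spec : Claim_equal_build_id_to_path := by
  intro id_to_tag _hdom
  unfold Spec_build_id_to_path build_id_to_path build_id_to_path_alt
  dsimp only
  rw [pvFoldB (PySem.Dict.ofList id_to_tag) _ _ _ (fun qs v h => by
    rw [PySem.Dict.get?_empty] at h; cases h)]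
  congr 1
  have hkeys : (PySem.Dict.ofList id_to_tag).keys = (PySem.Dict.ofList id_to_tag).items.map (·.1) := rfl
  rw [hkeys, List.foldl_map]
  apply PySem.List.foldl_congr_mem
  intro acc p _
  rw [pvAinner_correct (PySem.Dict.ofList id_to_tag) ((PySem.Str.split? p.1 ".").getD []).length _ le_rfl]
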